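-- pv_equiv track=rewrite | github.com/TurinFohlen/PrimeLog | primelog-2.5/primelog-pkg/primelog/tools/exporter.py | decode_errors
-- ===== SOURCE A (Python) =====
-- def decode_errors(composite, prime_map):
--     """从复合值解码错误类型列表（本地实现，兼容任意 prime_map）"""
--     if composite <= 1:
--         return ['none']
--     remaining = composite
--     errors = []
--     rev_map = {v: k for k, v in prime_map.items()}
--     for p in sorted(rev_map.keys()):
--         if p <= 1: continue
--         if remaining % p == 0:
--             errors.append(rev_map[p])
--             while remaining % p == 0:
--                 remaining //= p
--     return errors or ['unknown']
-- ===== SOURCE B (Python) =====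
-- def decode_errors(composite, prime_map):
--     """Decode error types from a composite value (recursive scan over the sorted set of map values)."""
--     if composite <= 1:
--         return ['none']
--
--     def name_of(p):
--         # last map entry whose value is p (matches dict-reversal "last key wins")
--         for k, v in reversed(prime_map.items()):
--             if v == p:
--                 return k
--
--     def strip(n, p):
--         while n % p == 0:
--             n //= p
--         return n
--
--     def go(rem, ps):
--         if not ps:
--             return []
--         p, rest = ps[0], ps[1:]
--         if rem % p == 0:
--             return [name_of(p)] + go(strip(rem, p), rest)
--         return go(rem, rest)
--
--     return go(composite, sorted({v for v in prime_map.values() if v > 1})) or ['unknown']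
-- ===== Notes on version B (the rewrite author's own statement) =====
-- stated objective: alternative
-- what changed: Replaces A's reverse-dict construction and imperative accumulator loop with inner while by a recursive scan over the sorted set of map values, a pure power-stripping helper, and name lookup by backward search over the entries (no reverse dict, no mutable state).
import Mathlib
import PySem

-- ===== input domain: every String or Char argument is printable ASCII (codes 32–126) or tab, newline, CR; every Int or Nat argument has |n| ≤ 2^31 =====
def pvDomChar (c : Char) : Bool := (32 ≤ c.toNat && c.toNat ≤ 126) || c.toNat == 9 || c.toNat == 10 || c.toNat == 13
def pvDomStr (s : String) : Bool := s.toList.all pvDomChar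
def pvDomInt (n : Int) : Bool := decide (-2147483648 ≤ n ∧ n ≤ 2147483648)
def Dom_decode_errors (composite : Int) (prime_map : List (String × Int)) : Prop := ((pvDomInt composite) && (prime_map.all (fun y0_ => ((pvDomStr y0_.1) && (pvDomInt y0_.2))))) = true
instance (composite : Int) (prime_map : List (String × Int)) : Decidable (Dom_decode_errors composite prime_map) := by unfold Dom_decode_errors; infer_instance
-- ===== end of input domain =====

-- B replaces A's reverse-dict plus imperative accumulator/while loop by a recursive scan over the
-- sorted set of map values with a pure power-stripping helper and a backward name search (objective:
-- alternative decomposition, same cost).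

-- ===== PORT A =====

-- the inner 'while remaining % p == 0: remaining //= p' loop (identical in A and in Source B's strip
-- helper); the '2 ≤ p ∧ 0 < n' guard only makes the recursion total — it holds at every reachable call
def stripFac (n p : Int) : Int :=
  if h : 2 ≤ p ∧ 0 < n ∧ PySem.Int.mod n p = 0 then stripFac (PySem.Int.floordiv n p) p else n
termination_by n.toNat
decreasing_by
  rcases h with ⟨hp, hn, _⟩
  rw [PySem.Int.floordiv_eq_ediv_of_pos (by omega)]
  have h1 : n / p < n := Int.ediv_lt_of_lt_mul (by omega) (by nlinarith)
  have h2 : (0:Int) ≤ n / p := Int.ediv_nonneg (by omega) (by omega)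
  omega

-- rev_map = {v: k for k, v in prime_map.items()}  (prime_map is a Python dict: its items are those
-- of the association list under dict semantics, PySem.Dict.ofList)
def revA (prime_map : List (String × Int)) : PySem.Dict Int String :=
  (PySem.Dict.ofList prime_map).items.foldl (fun d kv => d.insert kv.2 kv.1) PySem.Dict.empty

def decode_errors (composite : Int) (prime_map : List (String × Int)) : List String :=
  if composite ≤ 1 then ["none"]
  else
    let rev := revA prime_map
    let res := (PySem.List.sorted rev.keys (fun x => x) false).foldl
      (fun (st : Int × List String) p =>
        if p ≤ 1 then st
        else if PySem.Int.mod st.1 p = 0 then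
          (stripFac st.1 p, st.2 ++ [(rev.get? p).getD ""])
        else st)
      (composite, [])
    if res.2 = [] then ["unknown"] else res.2

-- ===== PORT B =====

-- name_of(p): last dict entry whose value is p, via backward search
def nameOfB (prime_map : List (String × Int)) (p : Int) : String :=
  (((PySem.Dict.ofList prime_map).items.reverse.find? (fun kv => kv.2 == p)).map (·.1)).getD ""

-- go(rem, ps)
def goB (prime_map : List (String × Int)) (rem : Int) : List Int → List String
  | [] => []
  | p :: rest =>
    if PySem.Int.mod rem p = 0 then nameOfB prime_map p :: goB prime_map (stripFac rem p) rest
    else goB prime_map rem rest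

def decode_errors_alt (composite : Int) (prime_map : List (String × Int)) : List String :=
  if composite ≤ 1 then ["none"]
  else
    let ps := PySem.List.sorted
      (PySem.Set.ofList (((PySem.Dict.ofList prime_map).values).filter (fun v => decide (1 < v))))
      (fun x => x) false
    let res := goB prime_map composite ps
    if res = [] then ["unknown"] else res

-- ===== PRECONDITION & SPEC =====
def Spec_decode_errors (composite : Int) (prime_map : List (String × Int)) (out : List String) : Prop := out = decode_errors_alt composite prime_map
instance (composite : Int) (prime_map : List (String × Int)) (out : List String) : Decidable (Spec_decode_errors composite prime_map out) := by unfold Spec_decode_errors; infer_instance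

-- ===== CLAIM (what is proved, stated in full; the proofs are below) =====
def Claim_equal_decode_errors : Prop := ∀ (composite : Int) (prime_map : List (String × Int)), Dom_decode_errors composite prime_map → Spec_decode_errors composite prime_map (decode_errors composite prime_map)

-- ===== LEMMAS AND PROOFS =====

-- lookup in a dict built by 'insert kv.2 kv.1' over a list = last matching entry of the list
lemma revA_foldl_get? (items : List (String × Int)) (d : PySem.Dict Int String) (k : Int) :
    (items.foldl (fun d kv => d.insert kv.2 kv.1) d).get? k
      = ((items.reverse.find? (fun kv => kv.2 == k)).map (·.1)).or (d.get? k) := by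
  induction items generalizing d with
  | nil => simp
  | cons kv t ih =>
    simp only [List.foldl_cons, ih, List.reverse_cons, List.find?_append]
    cases hf : t.reverse.find? (fun kv => kv.2 == k) with
    | some w => simp
    | none =>
      simp only [Option.none_or, List.find?_cons, List.find?_nil]
      rw [PySem.Dict.get?_insert]
      by_cases hk : kv.2 = k
      · subst hk
        simp
      · have hb : (kv.2 == k) = false := by simp [hk]
        simp [Ne.symm hk, hb]

lemma revA_get? (prime_map : List (String × Int)) (k : Int) :
    (revA prime_map).get? k
      = ((PySem.Dict.ofList prime_map).items.reverse.find? (fun kv => kv.2 == k)).map (·.1) := by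
  rw [revA, revA_foldl_get?]
  simp

lemma revA_keys_nodup (prime_map : List (String × Int)) : (revA prime_map).keys.Nodup := by
  exact PySem.Dict.nodup_keys_foldl_insert_key (PySem.Dict.ofList prime_map).items
    (fun (kv : String × Int) => kv.2) (fun _ (kv : String × Int) => kv.1) PySem.Dict.empty
    PySem.Dict.nodup_keys_empty

lemma mem_revA_keys (prime_map : List (String × Int)) (k : Int) :
    k ∈ (revA prime_map).keys ↔ k ∈ (PySem.Dict.ofList prime_map).values := by
  rw [← PySem.Dict.contains_iff_mem_keys, PySem.Dict.contains_eq_isSome_get?, revA_get?]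
  simp only [Option.isSome_map, List.find?_isSome, List.mem_reverse]
  constructor
  · rintro ⟨kv, hmem, hk⟩
    simp only [beq_iff_eq] at hk
    exact hk ▸ List.mem_map_of_mem hmem
  · intro hv
    rcases List.mem_map.mp hv with ⟨kv, hmem, hk⟩
    exact ⟨kv, hmem, by simp [hk]⟩


-- A's iteration list, with the 'p <= 1' skips removed, is exactly B's iteration list
lemma sorted_filter_eq (prime_map : List (String × Int)) :
    PySem.List.sorted
        (PySem.Set.ofList (((PySem.Dict.ofList prime_map).values).filter (fun v => decide (1 < v))))
        (fun x => x) false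
      = (PySem.List.sorted (revA prime_map).keys (fun x => x) false).filter
          (fun p => decide (1 < p)) := by
  have hSnodup : (PySem.List.sorted (revA prime_map).keys (fun x => x) false).Nodup :=
    ((PySem.List.sorted_perm _ _ _).nodup_iff).mpr (revA_keys_nodup prime_map)
  have hSle := PySem.List.sorted_pairwise (revA prime_map).keys (fun x => x)
  have hSlt : (PySem.List.sorted (revA prime_map).keys (fun x => x) false).Pairwise (· < ·) :=
    (hSle.and hSnodup).imp (fun h => lt_of_le_of_ne h.1 h.2)
  apply PySem.List.sorted_eq_of_perm_of_pairwise_lt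
  · rw [List.perm_ext_iff_of_nodup (hSnodup.filter _) (PySem.Set.nodup_ofList _)]
    intro a
    simp only [List.mem_filter, PySem.List.mem_sorted, PySem.Set.mem_ofList,
      mem_revA_keys, decide_eq_true_eq]
  · exact hSlt.filter _

-- A's accumulator loop over any list = B's recursion over that list without the p ≤ 1 entries
lemma loop_eq (prime_map : List (String × Int)) (ps : List Int) :
    ∀ (rem : Int) (errs : List String),
    (ps.foldl
      (fun (st : Int × List String) p =>
        if p ≤ 1 then st
        else if PySem.Int.mod st.1 p = 0 then
          (stripFac st.1 p, st.2 ++ [((revA prime_map).get? p).getD ""])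
        else st)
      (rem, errs)).2
    = errs ++ goB prime_map rem (ps.filter (fun p => decide (1 < p))) := by
  induction ps with
  | nil => intro rem errs; simp [goB]
  | cons p t ih =>
    intro rem errs
    by_cases hp : p ≤ 1
    · have : decide (1 < p) = false := by simp; omega
      simp only [List.foldl_cons, if_pos hp, List.filter_cons, this, Bool.false_eq_true,
        if_false, ih]
    · have hq : decide (1 < p) = true := by simp; omega
      by_cases hm : PySem.Int.mod rem p = 0
      · rw [List.foldl_cons]
        simp only [if_neg hp, if_pos hm]
        rw [ih]
        simp [hq, goB, if_pos hm, revA_get?, nameOfB]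
      · rw [List.foldl_cons]
        simp only [if_neg hp, if_neg hm]
        rw [ih]
        simp [hq, goB, if_neg hm]

-- ===== VERDICT (by name: the statement is the Claim_ definition above) =====
theorem decode_errors_spec : Claim_equal_decode_errors := by
  intro composite prime_map _
  show decode_errors composite prime_map = decode_errors_alt composite prime_map
  unfold decode_errors decode_errors_alt
  by_cases hc : composite ≤ 1
  · simp [hc]
  · simp only [if_neg hc]
    rw [loop_eq, sorted_filter_eq]
    simp
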